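-- pv_equiv track=rewrite | github.com/sfelf/paper_streets | solution.py | __group_streets
-- ===== SOURCE A (Python) =====
-- def __group_streets(streets: list) -> list:
--     """ Combines the given streets into groups such that no group intersects another group
--     This method uses recursion to ensure that the returned groups don't have any intersections.
--     Args:
--         streets (list):
--             a list of sets of tuples where the sets represent streets and the tuples contain coordinates on the street
--     Returns:
--         a list of sets of tuples that represent all the groups of streets that can be formed from the given streets.
--         A group is made up of streets that all share at least one point with another street in the group
--     """
--     groups = []
--     for street in streets:
--         for group in groups:
--             if not street.isdisjoint(group):
--                 group.update(street)
--                 break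
--         else:
--             groups.append(street)
--     return groups if len(groups) == len(streets) else __group_streets(groups)
-- ===== SOURCE B (Python) =====
-- def __group_streets(streets: list) -> list:
--     """Groups streets into connected components by shared points.
--
--     Same merge order as the original, but each pass finds the first
--     intersecting group via a point -> first-group-index dict instead of
--     scanning all groups per street, and the pass is repeated iteratively
--     instead of recursively.
--     """
--     def merge_pass(items):
--         groups = []
--         first = {}  # point -> index of the first group containing it
--         for street in items:
--             hit = min((first[p] for p in street if p in first), default=None)
--             if hit is None:
--                 for p in street:
--                     first[p] = len(groups)
--                 groups.append(street)
--             else: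
--                 groups[hit] = groups[hit] | street
--                 for p in street:
--                     first[p] = hit
--         return groups
--
--     prev = len(streets)
--     groups = merge_pass(streets)
--     while len(groups) != prev:
--         prev = len(groups)
--         groups = merge_pass(groups)
--     return groups
-- ===== Notes on version B (the rewrite author's own statement) =====
-- stated objective: faster
-- what changed: B finds the first intersecting group via a point->first-group-index dict built during the pass (the inner scan over all groups with per-group isdisjoint tests disappears) and replaces A's recursion with an iterative repeat-until-stable loop.
import Mathlib
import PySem

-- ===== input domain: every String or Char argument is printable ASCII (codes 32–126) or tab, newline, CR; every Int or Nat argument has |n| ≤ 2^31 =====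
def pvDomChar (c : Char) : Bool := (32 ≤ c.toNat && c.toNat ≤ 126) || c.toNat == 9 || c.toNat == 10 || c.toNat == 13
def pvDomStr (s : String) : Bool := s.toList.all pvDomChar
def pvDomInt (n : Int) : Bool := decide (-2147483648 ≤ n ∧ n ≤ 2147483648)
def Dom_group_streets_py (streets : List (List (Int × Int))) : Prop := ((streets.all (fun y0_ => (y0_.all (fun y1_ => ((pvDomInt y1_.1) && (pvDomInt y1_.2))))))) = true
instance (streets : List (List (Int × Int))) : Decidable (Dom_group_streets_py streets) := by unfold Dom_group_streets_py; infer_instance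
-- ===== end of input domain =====

-- B replaces A's inner scan over all groups by a point -> first-group-index dict and A's
-- recursion by an iterative loop (objective: faster). Equivalence is about the RETURN value
-- only: A updates the caller's street sets in place, B builds fresh sets.

-- ===== PORT A =====
-- for group in groups: if not street.isdisjoint(group): group.update(street); break / else: groups.append(street)
def aStep (gs : List (List (Int × Int))) (street : List (Int × Int)) : List (List (Int × Int)) :=
  match gs with
  | [] => [street]
  | g :: rest =>
      if PySem.Set.isdisjoint street g then g :: aStep rest street
      else PySem.Set.update g street :: rest

-- termination fact cited by the ports' decreasing_by
theorem aStep_length_le (gs : List (List (Int × Int))) (s : List (Int × Int)) :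
    (aStep gs s).length ≤ gs.length + 1 := by
  induction gs with
  | nil => simp [aStep]
  | cons g rest ih =>
      simp only [aStep]
      split
      · simpa using Nat.succ_le_succ ih
      · simp

theorem foldl_aStep_length_le (l : List (List (Int × Int))) :
    ∀ gs : List (List (Int × Int)), (l.foldl aStep gs).length ≤ gs.length + l.length := by
  induction l with
  | nil => intro gs; simp
  | cons s t ih =>
      intro gs
      calc (t.foldl aStep (aStep gs s)).length ≤ (aStep gs s).length + t.length := ih _
        _ ≤ (gs.length + 1) + t.length := by exact Nat.add_le_add_right (aStep_length_le gs s) _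
        _ = gs.length + (s :: t).length := by simp [List.length_cons]; omega

def group_streets_py (streets : List (List (Int × Int))) : List (List (Int × Int)) :=
  if PySem.List.len (streets.foldl aStep []) = PySem.List.len streets then streets.foldl aStep []
  else group_streets_py (streets.foldl aStep [])
termination_by streets.length
decreasing_by
  rename_i hne
  rw [List.foldl_attach]
  simp only [List.foldl_attach] at hne
  have hle := foldl_aStep_length_le streets []
  simp only [List.length_nil, Nat.zero_add] at hle
  simp only [PySem.List.len_eq, Int.natCast_inj] at hne
  omega

-- ===== PORT B =====
-- one pass of B: per street, hit = min(first[p] for p in street if p in first, default=None);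
-- merge into groups[hit] or append, then point the street's points at the merged group
def bStep (st : List (List (Int × Int)) × PySem.Dict (Int × Int) Int)
    (street : List (Int × Int)) : List (List (Int × Int)) × PySem.Dict (Int × Int) Int :=
  match PySem.List.min? (street.filterMap (fun p => st.2.get? p)) (fun v => v) with
  | none =>
      (st.1 ++ [street],
       street.foldl (fun d p => d.insert p (PySem.List.len st.1)) st.2)
  | some hit =>
      (PySem.List.pySetD st.1 hit (PySem.Set.union (PySem.List.pyGetD st.1 hit []) street),
       street.foldl (fun d p => d.insert p hit) st.2)

def bPass (items : List (List (Int × Int))) : List (List (Int × Int)) :=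
  (items.foldl bStep ([], PySem.Dict.empty)).1

-- termination fact cited by bLoop's decreasing_by
theorem foldl_bStep_length_le (l : List (List (Int × Int))) :
    ∀ st : List (List (Int × Int)) × PySem.Dict (Int × Int) Int,
      ((l.foldl bStep st).1).length ≤ st.1.length + l.length := by
  induction l with
  | nil => intro st; simp
  | cons s t ih =>
      intro st
      have hstep : ((bStep st s).1).length ≤ st.1.length + 1 := by
        simp only [bStep]
        split
        · simp
        · simp [PySem.List.length_pySetD]
      calc ((t.foldl bStep (bStep st s)).1).length ≤ ((bStep st s).1).length + t.length := ih _
        _ ≤ (st.1.length + 1) + t.length := Nat.add_le_add_right hstep _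
        _ = st.1.length + (s :: t).length := by simp [List.length_cons]; omega

-- while len(groups) != prev: prev = len(groups); groups = merge_pass(groups)
def bLoop (groups : List (List (Int × Int))) (prev : Int) : List (List (Int × Int)) :=
  if PySem.List.len groups = prev then groups
  else bLoop (bPass groups) (PySem.List.len groups)
termination_by (2 * groups.length + (if PySem.List.len groups = prev then 0 else 1) : Nat)
decreasing_by
  rename_i hne
  have hle : (bPass groups).length ≤ groups.length := by
    have := foldl_bStep_length_le groups ([], PySem.Dict.empty)
    simpa using this
  simp only [hne, if_false]
  by_cases h : PySem.List.len (bPass groups) = PySem.List.len groups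
  · simp only [h, if_true]
    omega
  · simp only [PySem.List.len_eq, Int.natCast_inj] at h
    have : (bPass groups).length < groups.length := lt_of_le_of_ne hle h
    split <;> omega

def group_streets_py_alt (streets : List (List (Int × Int))) : List (List (Int × Int)) :=
  bLoop (bPass streets) (PySem.List.len streets)

-- ===== PRECONDITION & SPEC =====
def Spec_group_streets_py (streets : List (List (Int × Int))) (out : List (List (Int × Int))) : Prop := out = group_streets_py_alt streets
instance (streets : List (List (Int × Int))) (out : List (List (Int × Int))) : Decidable (Spec_group_streets_py streets out) := by unfold Spec_group_streets_py; infer_instance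

-- ===== CLAIM (what is proved, stated in full; the proofs are below) =====
def Claim_equal_group_streets_py : Prop := ∀ (streets : List (List (Int × Int))), Dom_group_streets_py streets → Spec_group_streets_py streets (group_streets_py streets)

-- ===== LEMMAS AND PROOFS =====

-- first index of a group containing point p
def firstPos (gs : List (List (Int × Int))) (p : Int × Int) : Option Nat :=
  match gs with
  | [] => none
  | g :: rest => if p ∈ g then some 0 else (firstPos rest p).map (· + 1)

-- first index of a group not disjoint from street s (what A's inner scan finds)
def firstHit (gs : List (List (Int × Int))) (s : List (Int × Int)) : Option Nat :=
  match gs with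
  | [] => none
  | g :: rest =>
      if PySem.Set.isdisjoint s g then (firstHit rest s).map (· + 1) else some 0

-- the dict invariant of B's pass: first[p] is the index of the first group containing p
def DInv (d : PySem.Dict (Int × Int) Int) (gs : List (List (Int × Int))) : Prop :=
  ∀ p : Int × Int, d.get? p = (firstPos gs p).map (fun n => (n : Int))

theorem firstPos_eq_none_iff (gs : List (List (Int × Int))) (p : Int × Int) :
    firstPos gs p = none ↔ ∀ g ∈ gs, p ∉ g := by
  induction gs with
  | nil => simp [firstPos]
  | cons g rest ih => by_cases h : p ∈ g <;> simp [firstPos, h, ih]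

theorem firstPos_eq_some_iff (gs : List (List (Int × Int))) (p : Int × Int) (j : Nat) :
    firstPos gs p = some j ↔
      j < gs.length ∧ p ∈ gs.getD j [] ∧ ∀ k < j, p ∉ gs.getD k [] := by
  induction gs generalizing j with
  | nil => simp [firstPos]
  | cons g rest ih =>
      by_cases h : p ∈ g
      · simp only [firstPos, h, if_true]
        constructor
        · intro hm
          injection hm with hm
          subst hm
          exact ⟨by simp, by simpa using h, by omega⟩
        · rintro ⟨-, -, hlt⟩
          rcases j with _ | j
          · rfl
          · exact absurd h (by simpa using hlt 0 (Nat.succ_pos _))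
      · simp only [firstPos, h, if_false]
        constructor
        · intro hm
          rcases Option.map_eq_some_iff.mp hm with ⟨j', hj', rfl⟩
          rcases (ih j').mp hj' with ⟨h1, h2, h3⟩
          refine ⟨by simpa using Nat.succ_lt_succ h1, by simpa using h2, ?_⟩
          intro k hk
          rcases k with _ | k
          · simpa using h
          · simpa using h3 k (by omega)
        · rintro ⟨h1, h2, h3⟩
          rcases j with _ | j
          · exact absurd (by simpa using h2) h
          · have : firstPos rest p = some j := by
              refine (ih j).mpr ⟨by simpa using h1, by simpa using h2, ?_⟩
              intro k hk
              simpa using h3 (k + 1) (by omega)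
            simp [this]

theorem firstHit_eq_none_iff (gs : List (List (Int × Int))) (s : List (Int × Int)) :
    firstHit gs s = none ↔ ∀ g ∈ gs, PySem.Set.isdisjoint s g = true := by
  induction gs with
  | nil => simp [firstHit]
  | cons g rest ih =>
      by_cases h : PySem.Set.isdisjoint s g
      · rw [show firstHit (g :: rest) s = (firstHit rest s).map (· + 1) from by simp [firstHit, h]]
        rw [Option.map_eq_none_iff, ih]
        constructor
        · intro hall g' hg'
          rcases List.mem_cons.mp hg' with rfl | hmem
          · exact h
          · exact hall g' hmem
        · intro hall g' hg'
          exact hall g' (List.mem_cons_of_mem _ hg')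
      · rw [show firstHit (g :: rest) s = some 0 from by simp [firstHit, h]]
        simp only [Option.some_ne_none, false_iff]
        intro hall
        exact h (hall g List.mem_cons_self)

theorem firstHit_eq_some_iff (gs : List (List (Int × Int))) (s : List (Int × Int)) (j : Nat) :
    firstHit gs s = some j ↔
      j < gs.length ∧ PySem.Set.isdisjoint s (gs.getD j []) = false ∧
        ∀ k < j, PySem.Set.isdisjoint s (gs.getD k []) = true := by
  induction gs generalizing j with
  | nil => simp [firstHit]
  | cons g rest ih =>
      by_cases h : PySem.Set.isdisjoint s g
      · simp only [firstHit, h, if_true]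
        constructor
        · intro hm
          rcases Option.map_eq_some_iff.mp hm with ⟨j', hj', rfl⟩
          rcases (ih j').mp hj' with ⟨h1, h2, h3⟩
          refine ⟨by simpa using Nat.succ_lt_succ h1, by simpa using h2, ?_⟩
          intro k hk
          rcases k with _ | k
          · simpa using h
          · simpa using h3 k (by omega)
        · rintro ⟨h1, h2, h3⟩
          rcases j with _ | j
          · rw [show ((g :: rest).getD 0 [] : List (Int × Int)) = g from rfl] at h2
            rw [h] at h2; cases h2
          · have : firstHit rest s = some j := by
              refine (ih j).mpr ⟨by simpa using h1, by simpa using h2, ?_⟩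
              intro k hk
              simpa using h3 (k + 1) (by omega)
            simp [this]
      · simp only [firstHit, h]
        constructor
        · rintro hj
          injection hj with hj; subst hj
          exact ⟨by simp, by simpa using eq_false_of_ne_true h, by omega⟩
        · rintro ⟨-, -, hlt⟩
          rcases j with _ | j
          · rfl
          · exact absurd (hlt 0 (Nat.succ_pos _)) (by simpa using h)

-- A's scan written through firstHit
theorem aStep_eq (gs : List (List (Int × Int))) (s : List (Int × Int)) :
    aStep gs s = match firstHit gs s with
      | none => gs ++ [s]
      | some j => gs.set j (PySem.Set.update (gs.getD j []) s) := by
  induction gs with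
  | nil => simp [aStep, firstHit]
  | cons g rest ih =>
      by_cases h : PySem.Set.isdisjoint s g
      · simp only [aStep, firstHit, h, if_true, ih]
        cases hfh : firstHit rest s <;> simp
      · simp [aStep, firstHit, h]

-- not-disjoint means a shared point
theorem not_disjoint_iff (s g : List (Int × Int)) :
    PySem.Set.isdisjoint s g = false ↔ ∃ p ∈ s, p ∈ g := by
  constructor
  · intro h
    by_contra hc
    have hc' : ∀ x ∈ s, x ∉ g := by
      intro x hx hxg
      exact hc ⟨x, hx, hxg⟩
    have : PySem.Set.isdisjoint s g = true := (PySem.Set.isdisjoint_iff s g).mpr hc'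
    rw [this] at h; cases h
  · rintro ⟨p, hps, hpg⟩ 
    by_contra h
    have := (PySem.Set.isdisjoint_iff s g).mp (by
      cases hv : PySem.Set.isdisjoint s g
      · exact absurd hv h
      · rfl)
    exact this p hps hpg

-- min of a nonempty Int list with identity key
theorem min?_id_eq (l : List Int) (m : Int) (hm : m ∈ l) (hb : ∀ v ∈ l, m ≤ v) :
    PySem.List.min? l (fun v => v) = some m := by
  rcases l with _ | ⟨x, t⟩
  · cases hm
  · rw [PySem.List.min?_id_cons]
    have h1 := PySem.List.foldl_min_le t x
    have h2 := PySem.List.foldl_min_mem t x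
    have hle : t.foldl min x ≤ m := by
      rcases List.mem_cons.mp hm with rfl | hmem
      · exact h1.1
      · exact h1.2 _ hmem
    have hge : m ≤ t.foldl min x := by
      rcases h2 with h | h
      · rw [h]; exact hb _ List.mem_cons_self
      · exact hb _ (List.mem_cons_of_mem _ h)
    rw [le_antisymm hle hge]

-- B's hit equals A's first non-disjoint group index
theorem hit_eq (d : PySem.Dict (Int × Int) Int) (gs : List (List (Int × Int)))
    (s : List (Int × Int)) (hinv : DInv d gs) :
    PySem.List.min? (s.filterMap (fun p => d.get? p)) (fun v => v)
      = (firstHit gs s).map (fun n => (n : Int)) := by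
  cases hfh : firstHit gs s with
  | none =>
      have hall := (firstHit_eq_none_iff gs s).mp hfh
      have : s.filterMap (fun p => d.get? p) = [] := by
        apply List.filterMap_eq_nil_iff.mpr
        intro p hp
        rw [hinv p]
        have hnone : firstPos gs p = none := by
          rw [firstPos_eq_none_iff]
          intro g hg
          exact (PySem.Set.isdisjoint_iff s g).mp (hall g hg) p hp
        rw [hnone]
        rfl
      rw [this]
      exact (PySem.List.min?_eq_none_iff _ _).mpr rfl
  | some j =>
      rcases (firstHit_eq_some_iff gs s j).mp hfh with ⟨hj, hnd, hmin⟩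
      rcases (not_disjoint_iff s _).mp hnd with ⟨p, hps, hpg⟩
      have hbound : ∀ q ∈ s, ∀ j', firstPos gs q = some j' → j ≤ j' := by
        intro q hqs j' hq
        rcases (firstPos_eq_some_iff gs q j').mp hq with ⟨hj', hq1, -⟩
        by_contra hlt
        have hlt' : j' < j := by omega
        have hdisj := hmin j' hlt'
        exact (PySem.Set.isdisjoint_iff s _).mp hdisj q hqs hq1
      have hpj : firstPos gs p = some j := by
        cases hfp : firstPos gs p with
        | none =>
            exfalso
            have hmem : gs.getD j [] ∈ gs := by
              rw [List.getD_eq_getElem gs [] hj]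
              exact List.getElem_mem hj
            exact (firstPos_eq_none_iff gs p).mp hfp _ hmem hpg
        | some j' =>
            have hle : j ≤ j' := hbound p hps j' hfp
            rcases (firstPos_eq_some_iff gs p j').mp hfp with ⟨hj'1, hj'2, hj'3⟩
            have hnot : ¬ j < j' := fun hlt => hj'3 j hlt hpg
            have : j' = j := by omega
            rw [this]
      apply min?_id_eq
      · refine List.mem_filterMap.mpr ⟨p, hps, ?_⟩
        rw [hinv p, hpj]
        rfl
      · intro v hv
        rcases List.mem_filterMap.mp hv with ⟨q, hqs, hq⟩
        rw [hinv q] at hq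
        cases hfq : firstPos gs q with
        | none => rw [hfq] at hq; cases hq
        | some j' =>
            rw [hfq] at hq
            have hv : v = (j' : Int) := by simpa using hq.symm
            rw [hv]
            show ((j : Nat) : Int) ≤ ((j' : Nat) : Int)
            exact_mod_cast hbound q hqs j' hfq

-- get? after the insert loop 'for p in street: first[p] = v'
theorem get?_foldl_insert_const (l : List (Int × Int)) (v : Int) :
    ∀ (d : PySem.Dict (Int × Int) Int) (q : Int × Int),
      (l.foldl (fun d p => d.insert p v) d).get? q = if q ∈ l then some v else d.get? q := by
  induction l with
  | nil => intro d q; simp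
  | cons p t ih =>
      intro d q
      rw [List.foldl_cons, ih]
      by_cases hq : q ∈ t
      · simp [hq]
      · rw [if_neg hq, PySem.Dict.get?_insert]
        by_cases hqp : q = p <;> simp [hqp, hq]

theorem firstPos_append_singleton (gs : List (List (Int × Int))) (s : List (Int × Int)) (p : Int × Int) :
    firstPos (gs ++ [s]) p = match firstPos gs p with
      | some j => some j
      | none => if p ∈ s then some gs.length else none := by
  induction gs with
  | nil => simp [firstPos]
  | cons g rest ih =>
      by_cases h : p ∈ g
      · simp [firstPos, h]
      · simp only [List.cons_append, firstPos, h, if_false, ih]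
        cases hfp : firstPos rest p
        · by_cases hs : p ∈ s <;> simp [hs]
        · simp

-- one B step computes one A step and preserves the invariant
theorem bStep_eq (gs : List (List (Int × Int))) (d : PySem.Dict (Int × Int) Int)
    (s : List (Int × Int)) (hinv : DInv d gs) :
    (bStep (gs, d) s).1 = aStep gs s ∧ DInv (bStep (gs, d) s).2 (aStep gs s) := by
  have hhit := hit_eq d gs s hinv
  rw [aStep_eq]
  cases hfh : firstHit gs s with
  | none =>
      have hhit' : PySem.List.min? (s.filterMap (fun p => d.get? p)) (fun v => v) = none := by
        rw [hhit, hfh]; rfl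
      have hb : bStep (gs, d) s =
          (gs ++ [s], s.foldl (fun d p => d.insert p (PySem.List.len gs)) d) := by
        simp only [bStep, hhit']
      rw [hb]
      refine ⟨rfl, ?_⟩
      intro q
      simp only
      rw [get?_foldl_insert_const, firstPos_append_singleton]
      by_cases hqs : q ∈ s
      · have hnone : firstPos gs q = none := by
          rw [firstPos_eq_none_iff]
          intro g hg
          exact (PySem.Set.isdisjoint_iff s g).mp ((firstHit_eq_none_iff gs s).mp hfh g hg) q hqs
        simp [hqs, hnone, PySem.List.len_eq]
      · rw [if_neg hqs, hinv q]
        cases hfp : firstPos gs q <;> simp [hqs]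
  | some j =>
      have hhit' : PySem.List.min? (s.filterMap (fun p => d.get? p)) (fun v => v)
          = some ((j : Nat) : Int) := by
        rw [hhit, hfh]; rfl
      rcases (firstHit_eq_some_iff gs s j).mp hfh with ⟨hj, hnd, hmin⟩
      have hb : bStep (gs, d) s =
          (gs.set j (PySem.Set.update (gs.getD j []) s),
           s.foldl (fun d p => d.insert p ((j : Nat) : Int)) d) := by
        simp only [bStep, hhit']
        rw [PySem.List.pySetD_natCast, PySem.List.pyGetD_natCast]
        rfl
      rw [hb]
      refine ⟨rfl, ?_⟩
      intro q
      simp only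
      rw [get?_foldl_insert_const]
      set gs' := gs.set j (PySem.Set.update (gs.getD j []) s) with hgs'
      have hget' : ∀ k : Nat, gs'.getD k [] =
          if k = j then PySem.Set.update (gs.getD j []) s else gs.getD k [] := by
        intro k
        simp only [hgs', List.getD, List.getElem?_set]
        by_cases hkj : j = k
        · subst hkj; simp [hj]
        · simp [hkj, Ne.symm hkj]
      have hlen' : gs'.length = gs.length := by simp [hgs']
      by_cases hqs : q ∈ s
      · rw [if_pos hqs]
        have hfp' : firstPos gs' q = some j := by
          rw [firstPos_eq_some_iff]
          refine ⟨by omega, ?_, ?_⟩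
          · rw [hget', if_pos rfl]
            exact (PySem.Set.mem_update _ _ _).mpr (Or.inr hqs)
          · intro k hk
            rw [hget', if_neg (by omega)]
            exact (PySem.Set.isdisjoint_iff s _).mp (hmin k hk) q hqs
        rw [hfp']
        rfl
      · rw [if_neg hqs, hinv q]
        have hmem : ∀ k : Nat, q ∈ gs'.getD k [] ↔ q ∈ gs.getD k [] := by
          intro k
          rw [hget']
          by_cases hkj : k = j
          · subst hkj
            rw [if_pos rfl, PySem.Set.mem_update]
            simp [hqs]
          · rw [if_neg hkj]
        have heq : firstPos gs' q = firstPos gs q := by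
          cases hfp : firstPos gs q with
          | none =>
              rw [firstPos_eq_none_iff] at hfp ⊢
              intro g hg
              rcases List.mem_iff_getElem.mp hg with ⟨k, hk, rfl⟩
              have hk' : k < gs.length := by omega
              have h1 : gs'[k] = gs'.getD k [] := by
                simp [List.getD, List.getElem?_eq_getElem hk]
              have h2 : gs.getD k [] = gs[k] := List.getD_eq_getElem gs [] hk'
              rw [h1, hmem k, h2]
              exact hfp _ (List.getElem_mem hk')
          | some k =>
              rw [firstPos_eq_some_iff] at hfp ⊢
              rcases hfp with ⟨h1, h2, h3⟩
              exact ⟨by omega, (hmem k).mpr h2, fun k' hk' hc => h3 k' hk' ((hmem k').mp hc)⟩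
        rw [heq]

-- folding B's pass tracks A's pass
theorem foldl_bStep_eq (l : List (List (Int × Int))) :
    ∀ (gs : List (List (Int × Int))) (d : PySem.Dict (Int × Int) Int), DInv d gs →
      (l.foldl bStep (gs, d)).1 = l.foldl aStep gs := by
  induction l with
  | nil => intro gs d _; rfl
  | cons s t ih =>
      intro gs d hinv
      rcases bStep_eq gs d s hinv with ⟨h1, h2⟩
      rw [List.foldl_cons, List.foldl_cons]
      have : bStep (gs, d) s = ((bStep (gs, d) s).1, (bStep (gs, d) s).2) := rfl
      rw [this, h1]
      exact ih _ _ h2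

theorem bPass_eq (l : List (List (Int × Int))) : bPass l = l.foldl aStep [] := by
  apply foldl_bStep_eq
  intro p
  simp [PySem.Dict.get?_empty, firstPos]

-- A's recursion equals B's while loop
theorem afix_eq_bLoop : ∀ (n : Nat) (xs : List (List (Int × Int))), xs.length ≤ n →
    group_streets_py xs = bLoop (bPass xs) (PySem.List.len xs) := by
  intro n
  induction n with
  | zero =>
      intro xs hxs
      have hnil : xs = [] := List.length_eq_zero_iff.mp (Nat.le_zero.mp hxs)
      subst hnil
      rw [group_streets_py.eq_def, bLoop.eq_def]
      simp [bPass, PySem.List.len_eq]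
  | succ n ih =>
      intro xs hxs
      rw [group_streets_py.eq_def, bLoop.eq_def, bPass_eq]
      simp only [PySem.List.len_eq, Int.natCast_inj]
      by_cases h : (List.foldl aStep [] xs).length = xs.length
      · simp [h]
      · rw [if_neg h, if_neg h, bPass_eq]
        have hlt : (xs.foldl aStep []).length < xs.length := by
          have hle := foldl_aStep_length_le xs []
          simp only [List.length_nil, Nat.zero_add] at hle
          omega
        have := ih (xs.foldl aStep []) (by omega)
        rw [this, bPass_eq, PySem.List.len_eq]

-- ===== VERDICT (by name: the statement is the Claim_ definition above) =====
theorem group_streets_py_spec : Claim_equal_group_streets_py := by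
  intro streets _
  unfold Spec_group_streets_py group_streets_py_alt
  exact afix_eq_bLoop streets.length streets (le_refl _)
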